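-- pv_equiv track=rewrite | github.com/jseltmann/DSGeneration | cider.py | get_ngram_counts
-- ===== SOURCE A (Python) =====
-- import collections as col
--
-- def get_ngram_counts(ref_dict, max_n):
--     """
--     For each ngram, add the appearences of that ngram
--     in the references for each image.
--     If it doesn't appear in the references for an image, add 1.
--     This is for the denominator of the idf part of the tfidf calculation.
--
--     Parameters
--     ----------
--     ref_dict : dict([[str]])
--         Reference sentences for each image id.
--     max_n : int
--         Maximum length of ngrams.
--
--     Return
--     ------
--     ngram_counts : dict(int)
--         Dictionary giving the count for each ngram in the reference sentences.
--     """
--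
--     ngrams = set()
--
--     for sent_list in ref_dict.values():
--         for sent in sent_list:
--             sent_ngrams = []
--             for n in list(range(max_n+1))[1:]:
--                 sent_ngrams += [tuple(sent[i:i+n])
--                                 for i in range(len(sent) - n + 1)]
--             for sent_ngram in sent_ngrams:
--                 ngrams.add(tuple(sent_ngram))
--
--     ngram_counts = col.defaultdict(int)
--
--     for image_id in ref_dict.keys():
--         image_counts = col.defaultdict(int)
--         for ref_sent in ref_dict[image_id]:
--             ref_ngrams = []
--             for n in list(range(max_n+1))[1:]:
--                 ref_ngrams += [tuple(ref_sent[i:i+n])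
--                                for i in range(len(ref_sent) - n + 1)]
--             for ref_ngram in ref_ngrams:
--                 image_counts[ref_ngram] += ref_ngrams.count(ref_ngram)
--         for ngram in ngrams:
--             #if image_counts[ngram] == 0:
--             #    ngram_counts[ngram] += 1
--             #else:
--             #    ngram_counts[ngram] += image_counts[ngram]
--             if image_counts[ngram] > 1:
--                 ngram_counts[ngram] += 1
--             else:
--                 ngram_counts[ngram] += image_counts[ngram]
--
--     return ngram_counts
-- ===== SOURCE B (Python) =====
-- import collections as col
--
-- def get_ngram_counts(ref_dict, max_n):
--     # Single-pass inverted index: for each ngram, the set of image ids whose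
--     # references contain it; the answer is the size of that set (document frequency).
--     index = {}
--     for image_id, sent_list in ref_dict.items():
--         for sent in sent_list:
--             length = len(sent)
--             for n in range(1, min(max_n, length) + 1):
--                 for i in range(length - n + 1):
--                     index.setdefault(tuple(sent[i:i + n]), set()).add(image_id)
--     ngram_counts = col.defaultdict(int)
--     for ngram, ids in index.items():
--         ngram_counts[ngram] = len(ids)
--     return ngram_counts
-- ===== Notes on version B (the rewrite author's own statement) =====
-- stated objective: faster
-- what changed: Replaces A's two-phase algorithm (collect a global ngram set, then for every image rescan every global ngram against a per-image count dict built with a quadratic ref_ngrams.count inner loop) by a single pass that builds an inverted index ngram -> set of image ids and reads each document frequency off as the set's size.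
import Mathlib
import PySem

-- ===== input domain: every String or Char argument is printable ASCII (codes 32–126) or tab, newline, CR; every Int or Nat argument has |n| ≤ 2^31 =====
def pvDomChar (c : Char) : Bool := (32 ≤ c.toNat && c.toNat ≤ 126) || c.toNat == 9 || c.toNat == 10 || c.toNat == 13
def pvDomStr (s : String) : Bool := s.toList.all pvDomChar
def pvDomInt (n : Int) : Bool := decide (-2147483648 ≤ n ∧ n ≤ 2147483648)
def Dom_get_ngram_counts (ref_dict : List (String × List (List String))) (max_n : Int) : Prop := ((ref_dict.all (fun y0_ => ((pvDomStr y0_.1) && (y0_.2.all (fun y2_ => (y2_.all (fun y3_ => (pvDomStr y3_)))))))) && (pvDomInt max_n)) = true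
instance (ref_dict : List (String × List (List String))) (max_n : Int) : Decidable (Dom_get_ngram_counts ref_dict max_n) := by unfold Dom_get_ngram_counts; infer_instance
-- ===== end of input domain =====

-- B replaces A's two-phase scan (global ngram set, then per-image per-ngram rescans with a
-- quadratic per-sentence count) by a single pass building an inverted index ngram -> set of
-- image ids; return values agree (the returned defaultdict is compared as a dict).

-- ===== PORT A =====
-- A's per-sentence ngram extraction: `for n in list(range(max_n+1))[1:]: sent_ngrams += [tuple(sent[i:i+n]) for i in range(len(sent)-n+1)]`
def pvNgramsA (sent : List String) (max_n : Int) : List (List String) :=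
  (PySem.List.slice (PySem.List.pyRange 0 (max_n + 1)) (some 1)).foldl
    (fun acc n => acc ++ (PySem.List.pyRange 0 ((sent.length : Int) - n + 1)).map
      (fun i => PySem.List.slice sent (some i) (some (i + n)))) []

def get_ngram_counts (ref_dict : List (String × List (List String))) (max_n : Int) : List (List String × Int) :=
  -- first loop: collect all ngrams into a set
  let ngrams : PySem.Set (List String) :=
    ref_dict.foldl (fun s kv =>
      kv.2.foldl (fun s sent =>
        (pvNgramsA sent max_n).foldl (fun s g => PySem.Set.add s g) s) s) PySem.Set.empty
  -- second loop: for image_id in ref_dict.keys(): ...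
  let ngram_counts : PySem.Dict (List String) Int :=
    (ref_dict.map Prod.fst).foldl (fun d image_id =>
      let sents := (PySem.Dict.mk ref_dict).getD image_id []
      let image_counts : PySem.Dict (List String) Int :=
        sents.foldl (fun ic ref_sent =>
          let ref_ngrams := pvNgramsA ref_sent max_n
          ref_ngrams.foldl (fun ic g =>
            ic.insert g (ic.getD g 0 + (PySem.List.count ref_ngrams g : Int))) ic) PySem.Dict.empty
      ngrams.foldl (fun d g =>
        if 1 < image_counts.getD g 0 then d.insert g (d.getD g 0 + 1)
        else d.insert g (d.getD g 0 + image_counts.getD g 0)) d) PySem.Dict.empty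
  ngram_counts.items

-- ===== PORT B =====
def get_ngram_counts_alt (ref_dict : List (String × List (List String))) (max_n : Int) : List (List String × Int) :=
  -- single pass: inverted index ngram -> set of image ids (index.setdefault(g, set()).add(image_id))
  let index : PySem.Dict (List String) (PySem.Set String) :=
    ref_dict.foldl (fun idx kv =>
      kv.2.foldl (fun idx sent =>
        (PySem.List.pyRange 1 (min max_n ((sent.length : Int)) + 1)).foldl (fun idx n =>
          (PySem.List.pyRange 0 ((sent.length : Int) - n + 1)).foldl (fun idx i =>
            PySem.Dict.insert idx (PySem.List.slice sent (some i) (some (i + n)))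
              ((idx.getD (PySem.List.slice sent (some i) (some (i + n))) PySem.Set.empty).add kv.1)) idx) idx) idx)
      PySem.Dict.empty
  -- `for ngram, ids in index.items(): ngram_counts[ngram] = len(ids)` over a fresh dict:
  -- index keys are distinct, so this loop is a map over the items
  index.items.map (fun gv => (gv.1, (gv.2.length : Int)))

-- ===== PRECONDITION & SPEC =====
-- Pre_ excludes association lists with duplicate image ids: a Python dict cannot hold them,
-- so such lists are not faithful representations of A's dict argument (Python collapses them
-- before either function runs).
def Pre_get_ngram_counts (ref_dict : List (String × List (List String))) (max_n : Int) : Prop :=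
  (ref_dict.map Prod.fst).Nodup
instance (ref_dict : List (String × List (List String))) (max_n : Int) : Decidable (Pre_get_ngram_counts ref_dict max_n) := by unfold Pre_get_ngram_counts; infer_instance

def pvWitness_get_ngram_counts : (List (String × List (List String))) × Int :=
  ([("img0", [["a", "b", "a"]]), ("img1", [["b"], ["a", "b"]])], 2)

def Spec_get_ngram_counts (ref_dict : List (String × List (List String))) (max_n : Int) (out : List (List String × Int)) : Prop := out = get_ngram_counts_alt ref_dict max_n
instance (ref_dict : List (String × List (List String))) (max_n : Int) (out : List (List String × Int)) : Decidable (Spec_get_ngram_counts ref_dict max_n out) := by unfold Spec_get_ngram_counts; infer_instance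

-- ===== CLAIM (what is proved, stated in full; the proofs are below) =====
def Claim_equal_get_ngram_counts : Prop := ∀ (ref_dict : List (String × List (List String))) (max_n : Int), Dom_get_ngram_counts ref_dict max_n → Pre_get_ngram_counts ref_dict max_n → Spec_get_ngram_counts ref_dict max_n (get_ngram_counts ref_dict max_n)

-- ===== LEMMAS AND PROOFS =====

-- the ngram bag (with multiplicity) of one image's reference sentences
def pvBag (max_n : Int) (kv : String × List (List String)) : List (List String) :=
  kv.2.flatMap (fun s => pvNgramsA s max_n)

-- all distinct ngrams, in first-appearance order
def pvGs (ref_dict : List (String × List (List String))) (max_n : Int) : List (List String) :=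
  PySem.Set.ofList (ref_dict.flatMap (pvBag max_n))

-- a dict whose items are a key list tabulated by a function
def pvDM {V : Type} (gsl : List (List String)) (F : List String → V) : PySem.Dict (List String) V :=
  PySem.Dict.mk (gsl.map (fun g => (g, F g)))

theorem pvDM_items {V : Type} (gsl : List (List String)) (F : List String → V) :
    (pvDM gsl F).items = gsl.map (fun g => (g, F g)) := rfl

theorem pvDM_contains {V : Type} (gsl : List (List String)) (F : List String → V) (k : List String) :
    (pvDM gsl F).contains k = decide (k ∈ gsl) := by
  rw [PySem.Dict.contains_eq_decide_mem_keys]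
  simp [pvDM, PySem.Dict.keys_mk]

theorem pvDM_getD {V : Type} (gsl : List (List String)) (F : List String → V) (k : List String) (d0 : V) :
    (pvDM gsl F).getD k d0 = if k ∈ gsl then F k else d0 := by
  induction gsl with
  | nil => simp [pvDM, PySem.Dict.getD, PySem.Dict.get?]
  | cons a t ih =>
    by_cases hak : a = k
    · subst hak
      simp [pvDM, PySem.Dict.getD, PySem.Dict.get?, List.find?_cons]
    · have : (pvDM (a :: t) F).getD k d0 = (pvDM t F).getD k d0 := by
        simp [pvDM, PySem.Dict.getD, PySem.Dict.get?, List.find?_cons, beq_iff_eq, hak]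
      rw [this, ih]
      have hka : k ≠ a := fun h => hak h.symm
      simp [List.mem_cons, hka]

theorem pvDM_congr {V : Type} (gsl : List (List String)) (F G : List String → V)
    (h : ∀ g ∈ gsl, F g = G g) : pvDM gsl F = pvDM gsl G := by
  unfold pvDM
  congr 1
  exact List.map_congr_left (fun g hg => by rw [h g hg])

theorem pvDM_insert_mem {V : Type} (gsl : List (List String)) (F : List String → V)
    (k : List String) (v : V) (hk : k ∈ gsl) :
    (pvDM gsl F).insert k v = pvDM gsl (fun g => if g = k then v else F g) := by
  have hc : (pvDM gsl F).contains k = true := by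
    rw [pvDM_contains]; exact decide_eq_true hk
  apply PySem.Dict.ext
  rw [PySem.Dict.items_insert_of_contains _ _ hc]
  simp only [pvDM, List.map_map]
  apply List.map_congr_left
  intro g _
  by_cases hg : g = k <;> simp [hg]

theorem pvDM_insert_not_mem {V : Type} (gsl : List (List String)) (F : List String → V)
    (k : List String) (v : V) (hk : k ∉ gsl) :
    (pvDM gsl F).insert k v = pvDM (gsl ++ [k]) (fun g => if g = k then v else F g) := by
  have hc : (pvDM gsl F).contains k = false := by
    rw [pvDM_contains]; exact decide_eq_false hk
  apply PySem.Dict.ext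
  rw [PySem.Dict.items_insert_of_not_contains _ _ hc]
  simp only [pvDM, List.map_append, List.map_cons, List.map_nil]
  congr 1
  apply List.map_congr_left
  intro g hg
  have : g ≠ k := fun h => hk (h ▸ hg)
  simp [this]

theorem pvLgsA (todo : List (List String)) (gsl : List (List String)) (w F : List String → Int)
    (hsub : todo ⊆ gsl) (hnd : todo.Nodup) :
    todo.foldl (fun d g => d.insert g (d.getD g 0 + w g)) (pvDM gsl F)
      = pvDM gsl (fun g => if g ∈ todo then F g + w g else F g) := by
  induction todo generalizing F with
  | nil => simp [List.foldl_nil]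
  | cons a t ih =>
    have ha : a ∈ gsl := hsub (List.mem_cons_self ..)
    have hat : a ∉ t := (List.nodup_cons.mp hnd).1
    rw [List.foldl_cons, pvDM_getD, if_pos ha, pvDM_insert_mem _ _ _ _ ha,
      ih _ (fun x hx => hsub (List.mem_cons_of_mem _ hx)) (List.nodup_cons.mp hnd).2]
    apply pvDM_congr
    intro g hg
    by_cases hgt : g ∈ t
    · have hga : g ≠ a := fun h => hat (h ▸ hgt)
      simp [hgt, hga, List.mem_cons]
    · by_cases hga : g = a
      · subst hga; simp [hgt, hat]
      · simp [hgt, hga, List.mem_cons]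

theorem pvLgsA0 (todo pre : List (List String)) (w F : List String → Int)
    (hnd : (pre ++ todo).Nodup) :
    todo.foldl (fun d g => d.insert g (d.getD g 0 + w g)) (pvDM pre F)
      = pvDM (pre ++ todo) (fun g => if g ∈ todo then w g else F g) := by
  induction todo generalizing pre F with
  | nil => simp [List.foldl_nil]
  | cons a t ih =>
    have hnd' : (pre ++ [a] ++ t).Nodup := by
      simpa [List.append_assoc] using hnd
    have hapre : a ∉ pre := fun h =>
      (List.disjoint_of_nodup_append hnd) h (List.mem_cons_self ..)
    have hat : a ∉ t := by
      have := (List.nodup_append.mp hnd).2.1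
      exact (List.nodup_cons.mp this).1
    rw [List.foldl_cons, pvDM_getD, if_neg hapre, pvDM_insert_not_mem _ _ _ _ hapre,
      ih _ _ hnd']
    have : pre ++ [a] ++ t = pre ++ a :: t := by simp
    rw [this]
    apply pvDM_congr
    intro g hg
    by_cases hgt : g ∈ t
    · have hga : g ≠ a := fun h => hat (h ▸ hgt)
      simp [hgt, hga, List.mem_cons]
    · by_cases hga : g = a
      · subst hga; simp [hgt, hat]
      · simp [hgt, hga, List.mem_cons]

theorem pvLouter (imgs : List (String × List (List String))) (gsl : List (List String))
    (w : String × List (List String) → List String → Int) (F : List String → Int)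
    (hnd : gsl.Nodup) :
    imgs.foldl (fun d kv => gsl.foldl (fun d g => d.insert g (d.getD g 0 + w kv g)) d) (pvDM gsl F)
      = pvDM gsl (fun g => F g + (imgs.map (fun kv => w kv g)).sum) := by
  induction imgs generalizing F with
  | nil => simp [List.foldl_nil]
  | cons kv t ih =>
    rw [List.foldl_cons, pvLgsA gsl gsl (w kv) F (List.Subset.refl _) hnd, ih]
    apply pvDM_congr
    intro g hg
    simp [hg, add_assoc]

theorem pvLB (occs : List (List String × String)) :
    occs.foldl (fun idx o => idx.insert o.1 ((idx.getD o.1 PySem.Set.empty).add o.2)) PySem.Dict.empty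
      = pvDM (PySem.Set.ofList (occs.map Prod.fst))
          (fun g => PySem.Set.ofList ((occs.filter (fun o => o.1 == g)).map Prod.snd)) := by
  induction occs using List.reverseRecOn with
  | nil => rfl
  | append_singleton occs o ih =>
    rw [List.foldl_append, List.foldl_cons, List.foldl_nil, ih]
    simp only [List.map_append, List.map_cons, List.map_nil]
    rw [PySem.Set.ofList_append_singleton]
    by_cases hm : o.1 ∈ PySem.Set.ofList (occs.map Prod.fst)
    · rw [PySem.Set.add_of_mem hm, pvDM_getD, if_pos hm, pvDM_insert_mem _ _ _ _ hm]
      apply pvDM_congr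
      intro g hg
      by_cases hgo : g = o.1
      · subst hgo
        simp only [List.filter_append, List.map_append]
        rw [List.filter_cons]
        simp only [beq_self_eq_true, if_pos]
        simp [PySem.Set.ofList_append_singleton]
      · have : (o.1 == g) = false := by simp [hgo]; intro h; exact hgo h.symm
        simp [List.filter_append, List.filter_cons, this, hgo]
    · rw [PySem.Set.add_of_not_mem hm, pvDM_getD, if_neg hm, pvDM_insert_not_mem _ _ _ _ hm]
      apply pvDM_congr
      intro g hg
      by_cases hgo : g = o.1
      · subst hgo
        have hfil : occs.filter (fun o' => o'.1 == o.1) = [] := by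
          rw [List.filter_eq_nil_iff]
          intro o' ho' h
          exact hm ((PySem.Set.mem_ofList _ _).mpr (List.mem_map.mpr ⟨o', ho', (beq_iff_eq.mp h)⟩))
        simp [List.filter_append, List.filter_cons, hfil, PySem.Set.ofList]
      · have : (o.1 == g) = false := by simp; intro h; exact hgo h.symm
        simp [List.filter_append, List.filter_cons, this, hgo]

theorem pvLic1 (l : List (List String)) (c : List String → Int) (d : PySem.Dict (List String) Int) (g : List String) :
    (l.foldl (fun d x => d.insert x (d.getD x 0 + c x)) d).getD g 0
      = d.getD g 0 + (l.count g : Int) * c g := by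
  induction l generalizing d with
  | nil => simp
  | cons x t ih =>
    rw [List.foldl_cons, ih, PySem.Dict.getD_insert]
    by_cases hxg : g = x
    · subst hxg
      simp only [List.count_cons_self, if_pos trivial, if_true]
      push_cast
      ring
    · simp [if_neg hxg, List.count_cons, hxg]
      exact Or.inl (fun h => hxg h.symm)

theorem pvLic2 (sents : List (List String)) (max_n : Int) (d : PySem.Dict (List String) Int) (g : List String) :
    ((sents.foldl (fun ic ref_sent =>
        (pvNgramsA ref_sent max_n).foldl (fun ic g' =>
          ic.insert g' (ic.getD g' 0 + (PySem.List.count (pvNgramsA ref_sent max_n) g' : Int))) ic) d).getD g 0)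
      = d.getD g 0 + (sents.map (fun s => ((pvNgramsA s max_n).count g : Int) * ((pvNgramsA s max_n).count g : Int))).sum := by
  induction sents generalizing d with
  | nil => simp
  | cons s t ih =>
    rw [List.foldl_cons, ih, pvLic1]
    simp [add_assoc, PySem.List.count]

theorem pvLw (sents : List (List String)) (max_n : Int) (g : List String) :
    (if 1 < (sents.map (fun s => ((pvNgramsA s max_n).count g : Int) * ((pvNgramsA s max_n).count g : Int))).sum
     then (1 : Int)
     else (sents.map (fun s => ((pvNgramsA s max_n).count g : Int) * ((pvNgramsA s max_n).count g : Int))).sum)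
      = if g ∈ sents.flatMap (fun s => pvNgramsA s max_n) then (1 : Int) else 0 := by
  set L := sents.map (fun s => ((pvNgramsA s max_n).count g : Int) * ((pvNgramsA s max_n).count g : Int)) with hL
  by_cases hmem : g ∈ sents.flatMap (fun s => pvNgramsA s max_n)
  · obtain ⟨s, hs, hg⟩ := List.mem_flatMap.mp hmem
    have hc : 1 ≤ ((pvNgramsA s max_n).count g : Int) := by
      exact_mod_cast Nat.one_le_iff_ne_zero.mpr (fun h => (List.count_eq_zero.mp h) hg)
    have hterm : (1 : Int) ≤ ((pvNgramsA s max_n).count g : Int) * ((pvNgramsA s max_n).count g : Int) :=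
      one_le_mul_of_one_le_of_one_le hc hc
    have hnn : ∀ x ∈ L, (0 : Int) ≤ x := by
      intro x hx
      obtain ⟨s', _, rfl⟩ := List.mem_map.mp hx
      positivity
    have hsum : (1 : Int) ≤ L.sum := by
      calc (1 : Int) ≤ _ := hterm
        _ ≤ L.sum := List.single_le_sum hnn _ (List.mem_map.mpr ⟨s, hs, rfl⟩)
    rw [if_pos hmem]
    by_cases h1 : 1 < L.sum
    · rw [if_pos h1]
    · rw [if_neg h1]; omega
  · have hz : L.sum = 0 := by
      apply List.sum_eq_zero
      intro x hx
      obtain ⟨s', hs', rfl⟩ := List.mem_map.mp hx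
      have : (pvNgramsA s' max_n).count g = 0 := by
        rw [List.count_eq_zero]
        intro hgm
        exact hmem (List.mem_flatMap.mpr ⟨s', hs', hgm⟩)
      rw [this]; simp
    rw [hz, if_neg hmem, if_neg (by omega)]

theorem pvLupdFlat {A : Type} (l : List A) (f : A → List (List String)) (s : PySem.Set (List String)) :
    l.foldl (fun s x => PySem.Set.update s (f x)) s = PySem.Set.update s (l.flatMap f) := by
  induction l generalizing s with
  | nil => simp [PySem.Set.update]
  | cons a t ih => rw [List.foldl_cons, ih, List.flatMap_cons, PySem.Set.update_append]

theorem pvLkey (ref_dict : List (String × List (List String))) (hnd : (ref_dict.map Prod.fst).Nodup)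
    (kv : String × List (List String)) (hkv : kv ∈ ref_dict) :
    (PySem.Dict.mk ref_dict).getD kv.1 [] = kv.2 := by
  have hitems : (kv.1, kv.2) ∈ (PySem.Dict.mk ref_dict).items := by simpa using hkv
  have hkeys : (PySem.Dict.mk ref_dict).keys.Nodup := by
    simpa [PySem.Dict.keys_mk] using hnd
  exact PySem.Dict.getD_of_mem_items _ hitems hkeys []

theorem pvLrepAux (s : PySem.Set String) (k : Nat) (a : String) :
    PySem.Set.update (PySem.Set.add s a) (List.replicate k a) = PySem.Set.add s a := by
  induction k with
  | zero => rfl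
  | succ n ih =>
    rw [List.replicate_succ, PySem.Set.update_cons,
      PySem.Set.add_of_mem ((PySem.Set.mem_add s a a).mpr (Or.inr rfl)), ih]

theorem pvLrep (s : PySem.Set String) (k : Nat) (a : String) :
    PySem.Set.update s (List.replicate k a) = if k = 0 then s else PySem.Set.add s a := by
  cases k with
  | zero => rfl
  | succ n =>
    rw [List.replicate_succ, PySem.Set.update_cons, pvLrepAux]
    simp

theorem pvLids (ref_dict : List (String × List (List String))) (n : String × List (List String) → Nat)
    (hnd : (ref_dict.map Prod.fst).Nodup) :
    PySem.Set.ofList (ref_dict.flatMap (fun kv => List.replicate (n kv) kv.1))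
      = (ref_dict.filter (fun kv => n kv != 0)).map Prod.fst := by
  induction ref_dict using List.reverseRecOn with
  | nil => rfl
  | append_singleton init kv ih =>
    have hnd' : (init.map Prod.fst).Nodup := by
      rw [List.map_append] at hnd
      exact (List.nodup_append.mp hnd).1
    have hfresh : kv.1 ∉ init.map Prod.fst := by
      rw [List.map_append] at hnd
      exact fun h => (List.disjoint_of_nodup_append hnd) h (by simp)
    rw [List.flatMap_append, PySem.Set.ofList_append, ih hnd', List.flatMap_cons, List.flatMap_nil,
      List.append_nil, pvLrep]
    by_cases hk : n kv = 0
    · simp [hk]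
    · rw [if_neg hk]
      have hmem : kv.1 ∉ ((init.filter (fun kv => n kv != 0)).map Prod.fst) := by
        intro h
        obtain ⟨kv', hkv', he⟩ := List.mem_map.mp h
        exact hfresh (List.mem_map.mpr ⟨kv', List.mem_of_mem_filter hkv', he⟩)
      rw [PySem.Set.add_of_not_mem hmem]
      simp [List.filter_append, hk]

theorem pvLblock (bag : List (List String)) (a : String) (g : List String) :
    (((bag.map (fun h => (h, a))).filter (fun o => o.1 == g)).map Prod.snd)
      = List.replicate (bag.count g) a := by
  induction bag with
  | nil => rfl
  | cons h t ih =>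
    rw [List.map_cons, List.filter_cons]
    by_cases hg : h = g
    · subst hg
      simp only [beq_self_eq_true, if_pos]
      rw [List.map_cons, ih]
      simp [List.count_cons, List.replicate_succ]
    · have hb : ((h, a).1 == g) = false := by simpa using hg
      have hg' : ¬g = h := fun he => hg he.symm
      simp [hb, ih, List.count_cons, hg, hg']

theorem pvLfoldlFlat {A B C : Type} (l : List A) (f : A → List B) (st : C → B → C) (c : C) :
    l.foldl (fun c x => (f x).foldl st c) c = (l.flatMap f).foldl st c := by
  induction l generalizing c with
  | nil => rfl
  | cons a t ih => rw [List.foldl_cons, ih, List.flatMap_cons, List.foldl_append]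

theorem pvLset (ref_dict : List (String × List (List String))) (max_n : Int) :
    ref_dict.foldl (fun s kv =>
      kv.2.foldl (fun s sent =>
        (pvNgramsA sent max_n).foldl (fun s g => PySem.Set.add s g) s) s) PySem.Set.empty
      = pvGs ref_dict max_n := by
  rw [PySem.List.foldl_congr_mem _ _ (fun s kv => PySem.Set.update s (pvBag max_n kv)) _
    (by
      intro acc kv _
      show kv.2.foldl (fun s sent => PySem.Set.update s (pvNgramsA sent max_n)) acc = _
      rw [pvLupdFlat]
      rfl)]
  rw [pvLupdFlat, PySem.Set.update_empty]
  rfl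

theorem pvLngrams (sent : List String) (max_n : Int) :
    (PySem.List.pyRange 1 (min max_n ((sent.length : Int)) + 1)).flatMap
      (fun n => (PySem.List.pyRange 0 ((sent.length : Int) - n + 1)).map
        (fun i => PySem.List.slice sent (some i) (some (i + n))))
      = pvNgramsA sent max_n := by
  unfold pvNgramsA
  rw [PySem.List.slice_from _ (by norm_num : (0:Int) ≤ 1),
    PySem.List.foldl_append_eq_flatMap]
  simp only [List.nil_append]
  set L : Int := (sent.length : Int) with hLdef
  have hL0 : 0 ≤ L := by positivity
  by_cases hm : max_n + 1 ≤ 0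
  · rw [PySem.List.pyRange_one_eq_nil hm]
    have : min max_n L + 1 ≤ 1 := by omega
    rw [PySem.List.pyRange_one_eq_nil this]
    rfl
  · push_neg at hm
    rw [PySem.List.pyRange_one_cons (by omega : (0:Int) < max_n + 1)]
    simp only [Int.toNat_one, List.drop_succ_cons, List.drop_zero, zero_add]
    by_cases hml : max_n ≤ L
    · rw [min_eq_left hml]
    · push_neg at hml
      rw [min_eq_right (le_of_lt hml),
        PySem.List.pyRange_one_append 1 (L + 1) (max_n + 1) (by omega) (by omega)]
      rw [List.flatMap_append]
      have hnil : (PySem.List.pyRange (L + 1) (max_n + 1)).flatMap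
          (fun n => (PySem.List.pyRange 0 (L - n + 1)).map
            (fun i => PySem.List.slice sent (some i) (some (i + n)))) = [] := by
        apply List.flatMap_eq_nil_iff.mpr
        intro n hn
        have hn' : L + 1 ≤ n := (PySem.List.mem_pyRange_one.mp hn).1
        rw [PySem.List.pyRange_one_eq_nil (by omega : L - n + 1 ≤ 0)]
        rfl
      rw [hnil, List.append_nil]


theorem pvLA (kv : String × List (List String)) (t : List (String × List (List String)))
    (gsl : List (List String)) (ind : String × List (List String) → List String → Int)
    (hnd : gsl.Nodup) :
    (kv :: t).foldl (fun d kv' => gsl.foldl (fun d g => d.insert g (d.getD g 0 + ind kv' g)) d)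
        PySem.Dict.empty
      = pvDM gsl (fun g => ((kv :: t).map (fun kv' => ind kv' g)).sum) := by
  rw [List.foldl_cons]
  have h0 : (PySem.Dict.empty : PySem.Dict (List String) Int) = pvDM [] (fun _ => 0) := rfl
  rw [h0, pvLgsA0 gsl [] (ind kv) _ (by simpa using hnd)]
  simp only [List.nil_append]
  rw [pvLouter t gsl ind _ hnd]
  apply pvDM_congr
  intro g hg
  simp [hg]

theorem pvLoccs (ref_dict : List (String × List (List String))) (max_n : Int) (g : List String) :
    ((ref_dict.flatMap (fun kv => (pvBag max_n kv).map (fun h => (h, kv.1)))).filter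
        (fun o => o.1 == g)).map Prod.snd
      = ref_dict.flatMap (fun kv => List.replicate ((pvBag max_n kv).count g) kv.1) := by
  induction ref_dict with
  | nil => rfl
  | cons kv t ih =>
    rw [List.flatMap_cons, List.filter_append, List.map_append, ih, pvLblock, List.flatMap_cons]

theorem pvLsum (ref_dict : List (String × List (List String))) (max_n : Int) (g : List String) :
    (ref_dict.map (fun kv => if g ∈ pvBag max_n kv then (1 : Int) else 0)).sum
      = (((ref_dict.filter (fun kv => (pvBag max_n kv).count g != 0)).map Prod.fst).length : Int) := by
  induction ref_dict with
  | nil => rfl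
  | cons kv t ih =>
    rw [List.map_cons, List.sum_cons, ih, List.filter_cons]
    by_cases h : g ∈ pvBag max_n kv
    · have hc : ((pvBag max_n kv).count g != 0) = true := by
        simp [List.count_eq_zero]
        exact h
      simp only [h, if_pos, hc]
      push_cast [List.map_cons, List.length_cons]
      ring
    · have hc : ((pvBag max_n kv).count g != 0) = false := by
        simp [List.count_eq_zero]
        exact h
      simp [h, hc]

-- ===== VERDICT (by name: the statement is the Claim_ definition above) =====
theorem get_ngram_counts_spec : Claim_equal_get_ngram_counts := by
  intro rd m _hdom hpre
  unfold Pre_get_ngram_counts at hpre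
  unfold Spec_get_ngram_counts
  have hndgs : (pvGs rd m).Nodup := PySem.Set.nodup_ofList _
  -- A side: the returned dict is the tabulation of the indicator sums over pvGs
  have hA : get_ngram_counts rd m
      = (pvGs rd m).map (fun g =>
          (g, (rd.map (fun kv => if g ∈ pvBag m kv then (1 : Int) else 0)).sum)) := by
    simp only [get_ngram_counts, pvLset]
    rw [List.foldl_map]
    rw [PySem.List.foldl_congr_mem rd _
      (fun d kv => (pvGs rd m).foldl (fun d g =>
        d.insert g (d.getD g 0 + (if g ∈ pvBag m kv then (1 : Int) else 0))) d) _
      (by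
        intro acc kv hkv
        simp only [pvLkey rd hpre kv hkv]
        apply PySem.List.foldl_congr_mem
        intro d g hg
        rw [pvLic2]
        simp only [PySem.Dict.getD_empty, zero_add]
        have hsplit : ∀ (S : Int),
            (if 1 < S then d.insert g (d.getD g 0 + 1) else d.insert g (d.getD g 0 + S))
              = d.insert g (d.getD g 0 + (if 1 < S then 1 else S)) := by
          intro S; split_ifs <;> rfl
        rw [hsplit, pvLw]
        rfl)]
    cases rd with
    | nil => rfl
    | cons kv t =>
      rw [pvLA kv t _ _ hndgs]
      rfl
  -- B side: the inverted index tabulates, per ngram, the ids of the images containing it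
  have hB : get_ngram_counts_alt rd m
      = (pvGs rd m).map (fun g =>
          (g, ((((rd.filter (fun kv => (pvBag m kv).count g != 0)).map Prod.fst).length : Nat) : Int))) := by
    simp only [get_ngram_counts_alt]
    have hflat : rd.foldl (fun idx kv =>
        kv.2.foldl (fun idx sent =>
          (PySem.List.pyRange 1 (min m ((sent.length : Int)) + 1)).foldl (fun idx n =>
            (PySem.List.pyRange 0 ((sent.length : Int) - n + 1)).foldl (fun idx i =>
              PySem.Dict.insert idx (PySem.List.slice sent (some i) (some (i + n)))
                ((idx.getD (PySem.List.slice sent (some i) (some (i + n))) PySem.Set.empty).add kv.1)) idx) idx) idx)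
        PySem.Dict.empty
        = (rd.flatMap (fun kv => (pvBag m kv).map (fun g => (g, kv.1)))).foldl
            (fun idx o => idx.insert o.1 ((idx.getD o.1 PySem.Set.empty).add o.2)) PySem.Dict.empty := by
      rw [← pvLfoldlFlat]
      apply PySem.List.foldl_congr_mem
      intro acc kv _
      rw [List.foldl_map]
      show _ = (kv.2.flatMap (fun s => pvNgramsA s m)).foldl _ acc
      rw [← pvLfoldlFlat]
      apply PySem.List.foldl_congr_mem
      intro acc2 sent _
      rw [← pvLngrams, ← pvLfoldlFlat]
      apply PySem.List.foldl_congr_mem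
      intro acc3 n _
      rw [List.foldl_map]
    rw [hflat, pvLB]
    have hkeys : (rd.flatMap (fun kv => (pvBag m kv).map (fun g => (g, kv.1)))).map Prod.fst
        = rd.flatMap (pvBag m) := by
      rw [List.map_flatMap]
      simp [List.map_map, Function.comp_def]
    rw [pvDM_items, List.map_map, hkeys]
    show (pvGs rd m).map _ = _
    apply List.map_congr_left
    intro g hg
    simp only [Function.comp_apply]
    rw [pvLoccs, pvLids rd (fun kv => (pvBag m kv).count g) hpre]
  rw [hA, hB]
  apply List.map_congr_left
  intro g hg
  rw [pvLsum]
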